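-- pv_equiv track=rewrite | github.com/jinhyuk9714/dingcorithm_ | 4th_week/04_09_get_all_ways_of_theater_seat_BOJ2302.py | get_all_ways_of_theater_seat
-- ===== SOURCE A (Python) =====
-- memo = {
--     0: 1,
--     1: 1,  # 이 문제에서는 Fibo(1) = 1, Fibo(2) = 2 로 시작합니다!
--     2: 2
-- }
--
-- def fibo_dynamic_programming(n, fibo_memo):
--     if n in fibo_memo:
--         return fibo_memo[n]
--     fibo_memo[n] = fibo_dynamic_programming(n - 1, fibo_memo) + fibo_dynamic_programming(n - 2, fibo_memo)
--     return fibo_memo[n]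
--
-- def get_all_ways_of_theater_seat(total_count, fixed_seat_array):
--     all_ways = 1
--     current_index = 0
--
--     for fixed_seat in fixed_seat_array:
--         fixed_seat_index = fixed_seat - 1
--         count_of_ways = fibo_dynamic_programming(fixed_seat_index - current_index, memo)
--         all_ways *= count_of_ways
--         current_index = fixed_seat_index + 1
--
--     count_of_ways = fibo_dynamic_programming(total_count - current_index, memo)
--     all_ways *= count_of_ways
--
--     return all_ways
-- ===== SOURCE B (Python) =====
-- def _fib(n):
--     # fib with fib(0)=fib(1)=1, fib(2)=2, computed bottom-up with two rolling values
--     a, b = 1, 1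
--     for _ in range(n):
--         a, b = b, a + b
--     return a
--
-- def get_all_ways_of_theater_seat(total_count, fixed_seat_array):
--     ways = 1
--     prev = 0
--     for seat in fixed_seat_array:
--         gap = seat - 1 - prev
--         if gap < 0:
--             raise ValueError("fixed seats must be strictly increasing and start at 1")
--         ways *= _fib(gap)
--         prev = seat
--     last_gap = total_count - prev
--     if last_gap < 0:
--         raise ValueError("total_count must not be below the last fixed seat")
--     return ways * _fib(last_gap)
-- ===== Notes on version B (the rewrite author's own statement) =====
-- stated objective: idiomatic
-- what changed: Replaces the globally-memoized recursive Fibonacci helper with an iterative bottom-up helper keeping two rolling values, computes each seat gap directly from the previous fixed seat, and drops the shared mutable memo dict.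
import Mathlib
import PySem

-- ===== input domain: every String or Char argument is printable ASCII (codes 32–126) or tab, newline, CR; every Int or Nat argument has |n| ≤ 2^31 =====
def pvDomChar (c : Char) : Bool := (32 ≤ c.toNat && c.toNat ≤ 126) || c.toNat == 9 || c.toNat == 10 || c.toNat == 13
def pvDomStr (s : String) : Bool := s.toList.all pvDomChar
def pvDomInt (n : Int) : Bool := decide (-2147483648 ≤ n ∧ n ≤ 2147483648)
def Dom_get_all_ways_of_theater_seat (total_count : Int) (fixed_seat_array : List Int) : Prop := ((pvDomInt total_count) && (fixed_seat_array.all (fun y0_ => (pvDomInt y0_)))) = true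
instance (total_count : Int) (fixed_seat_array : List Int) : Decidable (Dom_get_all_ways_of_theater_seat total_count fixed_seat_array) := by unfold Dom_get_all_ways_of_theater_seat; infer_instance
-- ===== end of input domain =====

-- B replaces A's globally-memoized recursive Fibonacci helper with an iterative
-- rolling-pair helper and tracks the previous fixed seat directly (idiomatic; not faster).
-- A mutates the module-level memo dict; the equivalence proved here is about the return value only.


-- ===== PORT A =====
-- the module-level dict  memo = {0: 1, 1: 1, 2: 2}
def pyMemo : PySem.Dict Int Int :=
  ((PySem.Dict.empty.insert 0 1).insert 1 1).insert 2 2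

-- A's fibo_dynamic_programming mutates the memo dict; the port threads it explicitly
-- (returns the value together with the updated memo).  In Python the recursion is on an
-- int n; for n < 0 it recurses without bound and raises RecursionError (excluded by Pre_),
-- so the port takes a Nat (callers use .toNat, exact on Pre_) and recurses through the
-- n ≥ 2 pattern; the fall-through branch only makes the match total and is unreachable
-- because the memo always contains keys 0, 1, 2.
def fibo_dynamic_programming : Nat → PySem.Dict Int Int → Int × PySem.Dict Int Int
  | n, fibo_memo =>
    match fibo_memo.get? (n : Int) with
    | some v => (v, fibo_memo)
    | none =>
      match n with
      | (m+2) =>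
        let r1 := fibo_dynamic_programming (m+1) fibo_memo
        let r2 := fibo_dynamic_programming m r1.2
        (r1.1 + r2.1, r2.2.insert ((m+2 : Nat) : Int) (r1.1 + r2.1))
      | _ => (0, fibo_memo)

def get_all_ways_of_theater_seat (total_count : Int) (fixed_seat_array : List Int) : Int :=
  -- state = (all_ways, current_index, memo)
  let st := fixed_seat_array.foldl
    (fun (p : Int × Int × PySem.Dict Int Int) fixed_seat =>
      let fixed_seat_index := fixed_seat - 1
      let r := fibo_dynamic_programming (fixed_seat_index - p.2.1).toNat p.2.2
      (p.1 * r.1, fixed_seat_index + 1, r.2))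
    (1, 0, pyMemo)
  let r := fibo_dynamic_programming (total_count - st.2.1).toNat st.2.2
  st.1 * r.1

-- ===== PORT B =====
-- Source B's _fib: two rolling values, n loop steps (range(n) is empty for n < 0, hence .toNat)
-- Source B raises ValueError on a negative gap (unsorted/duplicate seats, total below the last
-- seat); those inputs are outside Pre_ (where Python A raises too), so the port carries no
-- branch for them and simply folds on.
def fibIter (n : Int) : Int :=
  ((List.range n.toNat).foldl (fun (p : Int × Int) _ => (p.2, p.1 + p.2)) (1, 1)).1

def get_all_ways_of_theater_seat_alt (total_count : Int) (fixed_seat_array : List Int) : Int :=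
  -- state = (ways, prev)
  let st := fixed_seat_array.foldl
    (fun (p : Int × Int) seat => (p.1 * fibIter (seat - 1 - p.2), seat))
    (1, 0)
  st.1 * fibIter (total_count - st.2)

-- ===== PRECONDITION & SPEC =====
-- Pre_ excludes exactly the inputs on which A's recursion receives a negative argument
-- (unsorted/duplicate seats, a seat below 1, or total_count below the last fixed seat):
-- there fibo_dynamic_programming recurses without bound and A raises RecursionError,
-- returning no value of the type.  B raises ValueError on the same inputs.
def Pre_get_all_ways_of_theater_seat (total_count : Int) (fixed_seat_array : List Int) : Prop :=
  List.IsChain (· < ·) (0 :: fixed_seat_array) ∧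
  (fixed_seat_array.getLast?.getD 0) ≤ total_count
instance (total_count : Int) (fixed_seat_array : List Int) : Decidable (Pre_get_all_ways_of_theater_seat total_count fixed_seat_array) := by unfold Pre_get_all_ways_of_theater_seat; infer_instance

def pvWitness_get_all_ways_of_theater_seat : Int × List Int := (9, [2, 5])

def Spec_get_all_ways_of_theater_seat (total_count : Int) (fixed_seat_array : List Int) (out : Int) : Prop := out = get_all_ways_of_theater_seat_alt total_count fixed_seat_array
instance (total_count : Int) (fixed_seat_array : List Int) (out : Int) : Decidable (Spec_get_all_ways_of_theater_seat total_count fixed_seat_array out) := by unfold Spec_get_all_ways_of_theater_seat; infer_instance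

-- ===== CLAIM (what is proved, stated in full; the proofs are below) =====
def Claim_equal_get_all_ways_of_theater_seat : Prop := ∀ (total_count : Int) (fixed_seat_array : List Int), Dom_get_all_ways_of_theater_seat total_count fixed_seat_array → Pre_get_all_ways_of_theater_seat total_count fixed_seat_array → Spec_get_all_ways_of_theater_seat total_count fixed_seat_array (get_all_ways_of_theater_seat total_count fixed_seat_array)

-- ===== LEMMAS AND PROOFS =====
-- pure reference Fibonacci (proof-side only): F 0 = F 1 = 1, F 2 = 2
def fibRef : Nat → Int
  | 0 => 1
  | 1 => 1
  | 2 => 2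
  | (n+3) => fibRef (n+2) + fibRef (n+1)

lemma fibRef_add (n : Nat) :
    fibRef (n + 2) = fibRef (n + 1) + fibRef n := by
  match n with
  | 0 => decide
  | (m+1) => rfl

-- the memo invariant: keys 0,1,2 are present and every stored value is correct
def MemoInv (d : PySem.Dict Int Int) : Prop :=
  d.get? 0 = some 1 ∧ d.get? 1 = some 1 ∧ d.get? 2 = some 2 ∧
  ∀ (n : Nat) (v : Int), d.get? (n : Int) = some v → v = fibRef n

lemma memoInv_pyMemo : MemoInv pyMemo := by
  refine ⟨by decide, by decide, by decide, ?_⟩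
  intro n v h
  simp only [pyMemo, PySem.Dict.get?_insert, PySem.Dict.get?_empty] at h
  split_ifs at h with h2 h1 h0
  · obtain rfl : n = 2 := by exact_mod_cast h2
    simpa [fibRef] using h.symm
  · obtain rfl : n = 1 := by exact_mod_cast h1
    simpa [fibRef] using h.symm
  · obtain rfl : n = 0 := by exact_mod_cast h0
    simpa [fibRef] using h.symm

lemma fibo_dp_correct (n : Nat) (d : PySem.Dict Int Int) (hd : MemoInv d) :
    (fibo_dynamic_programming n d).1 = fibRef n ∧
      MemoInv (fibo_dynamic_programming n d).2 := by
  induction n using Nat.strong_induction_on generalizing d with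
  | _ n ih =>
    obtain ⟨h0, h1, h2, hval⟩ := hd
    unfold fibo_dynamic_programming
    cases hg : d.get? (n : Int) with
    | some v => exact ⟨hval n v hg, h0, h1, h2, hval⟩
    | none =>
      match n with
      | 0 => exact absurd hg (by rw [show ((0:Nat):Int) = 0 from rfl, h0]; simp)
      | 1 => exact absurd hg (by rw [show ((1:Nat):Int) = 1 from rfl, h1]; simp)
      | (m+2) =>
        simp only
        obtain ⟨hv1, hm1⟩ := ih (m+1) (by omega) d ⟨h0, h1, h2, hval⟩
        obtain ⟨hv2, hm2⟩ := ih m (by omega) _ hm1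
        obtain ⟨g0, g1, g2, gval⟩ := hm2
        have hsum : (fibo_dynamic_programming (m+1) d).1 +
            (fibo_dynamic_programming m (fibo_dynamic_programming (m+1) d).2).1 =
            fibRef (m+2) := by rw [hv1, hv2, fibRef_add]
        refine ⟨hsum, ?_, ?_, ?_, ?_⟩
        · rw [PySem.Dict.get?_insert]; split_ifs with h <;> simp_all
        · rw [PySem.Dict.get?_insert]; split_ifs with h <;> simp_all
        · rw [PySem.Dict.get?_insert]; split_ifs with h
          · obtain rfl : m = 0 := by push_cast at h; omega
            rw [hsum]
            norm_num [fibRef]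
          · exact g2
        · intro k v hk
          rw [PySem.Dict.get?_insert] at hk
          split_ifs at hk with h
          · obtain rfl : k = m + 2 := by exact_mod_cast h
            rw [← hsum]; exact (Option.some_inj.mp hk).symm
          · exact gval k v hk

lemma fib_pair (n : Nat) :
    (List.range n).foldl (fun (p : Int × Int) _ => (p.2, p.1 + p.2)) (1, 1) =
      (fibRef n, fibRef (n + 1)) := by
  induction n with
  | zero => rfl
  | succ m ih =>
      rw [List.range_succ, List.foldl_append, ih]
      simp only [List.foldl]
      refine Prod.ext rfl ?_
      rw [show m + 1 + 1 = m + 2 from rfl, fibRef_add m]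
      ring

lemma fibIter_eq (g : Int) : fibIter g = fibRef g.toNat := by
  unfold fibIter
  rw [fib_pair]

-- both folds run in lockstep: equal ways, equal index, and the memo stays correct
lemma fold_rel (l : List Int) (w c : Int) (d : PySem.Dict Int Int) (hd : MemoInv d) :
    (l.foldl
      (fun (p : Int × Int × PySem.Dict Int Int) fixed_seat =>
        let fixed_seat_index := fixed_seat - 1
        let r := fibo_dynamic_programming (fixed_seat_index - p.2.1).toNat p.2.2
        (p.1 * r.1, fixed_seat_index + 1, r.2)) (w, c, d)).1 =
      (l.foldl (fun (p : Int × Int) seat => (p.1 * fibIter (seat - 1 - p.2), seat)) (w, c)).1 ∧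
    (l.foldl
      (fun (p : Int × Int × PySem.Dict Int Int) fixed_seat =>
        let fixed_seat_index := fixed_seat - 1
        let r := fibo_dynamic_programming (fixed_seat_index - p.2.1).toNat p.2.2
        (p.1 * r.1, fixed_seat_index + 1, r.2)) (w, c, d)).2.1 =
      (l.foldl (fun (p : Int × Int) seat => (p.1 * fibIter (seat - 1 - p.2), seat)) (w, c)).2 ∧
    MemoInv (l.foldl
      (fun (p : Int × Int × PySem.Dict Int Int) fixed_seat =>
        let fixed_seat_index := fixed_seat - 1
        let r := fibo_dynamic_programming (fixed_seat_index - p.2.1).toNat p.2.2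
        (p.1 * r.1, fixed_seat_index + 1, r.2)) (w, c, d)).2.2 := by
  induction l generalizing w c d with
  | nil => exact ⟨rfl, rfl, hd⟩
  | cons s t ih =>
    simp only [List.foldl]
    obtain ⟨hv, hm⟩ := fibo_dp_correct (s - 1 - c).toNat d hd
    rw [hv, show s - 1 + 1 = s from by omega, ← fibIter_eq]
    exact ih _ _ _ hm

-- ===== VERDICT (by name: the statement is the Claim_ definition above) =====
theorem get_all_ways_of_theater_seat_spec : Claim_equal_get_all_ways_of_theater_seat := by
  intro total_count fixed_seat_array _ _
  unfold Spec_get_all_ways_of_theater_seat get_all_ways_of_theater_seat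
    get_all_ways_of_theater_seat_alt
  obtain ⟨h1, h2, h3⟩ := fold_rel fixed_seat_array 1 0 pyMemo memoInv_pyMemo
  simp only
  rw [h1, h2, (fibo_dp_correct _ _ h3).1, ← fibIter_eq]
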